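-- pv_equiv track=rewrite | github.com/5c077/exRNA-NF | bin/compare_fasta.py | length_histogram
-- ===== SOURCE A (Python) =====
-- from collections import defaultdict, Counter
--
-- def length_histogram(records, bins=10):
--     """Return a simple text histogram of sequence lengths."""
--     if not records:
--         return []
--     lengths  = [len(seq) for _, seq in records]
--     min_l    = min(lengths)
--     max_l    = max(lengths)
--     if min_l == max_l:
--         return [(f"{min_l}", len(lengths))]
--     bin_size = max(1, (max_l - min_l) // bins)
--     hist     = defaultdict(int)
--     for l in lengths:
--         bucket = (l - min_l) // bin_size
--         hist[bucket] += 1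
--     rows = []
--     for b in sorted(hist):
--         lo = min_l + b * bin_size
--         hi = lo + bin_size - 1
--         rows.append((f"{lo}–{hi}", hist[b]))
--     return rows
-- ===== SOURCE B (Python) =====
-- def length_histogram(records, bins=10):
--     """Return a simple text histogram of sequence lengths."""
--     if not records:
--         return []
--     lengths = sorted(len(seq) for _, seq in records)
--     min_l = lengths[0]
--     max_l = lengths[-1]
--     if min_l == max_l:
--         return [(f"{min_l}", len(lengths))]
--     bin_size = max(1, (max_l - min_l) // bins)
--     buckets = [(l - min_l) // bin_size for l in lengths]
--     rows = []
--     i = 0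
--     n = len(buckets)
--     while i < n:
--         b = buckets[i]
--         j = i + 1
--         while j < n and buckets[j] == b:
--             j += 1
--         lo = min_l + b * bin_size
--         rows.append((f"{lo}–{lo + bin_size - 1}", j - i))
--         i = j
--     return rows
-- ===== Notes on version B (the rewrite author's own statement) =====
-- stated objective: alternative
-- what changed: Replaces the sparse bucket-counting dict plus a sorted() pass over its keys by sort-then-scan: sort the lengths once, map them to buckets (a nondecreasing sequence), and run-length-encode that sequence with a two-pointer scan, each maximal run emitting one row; no counting container at all.
import Mathlib
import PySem

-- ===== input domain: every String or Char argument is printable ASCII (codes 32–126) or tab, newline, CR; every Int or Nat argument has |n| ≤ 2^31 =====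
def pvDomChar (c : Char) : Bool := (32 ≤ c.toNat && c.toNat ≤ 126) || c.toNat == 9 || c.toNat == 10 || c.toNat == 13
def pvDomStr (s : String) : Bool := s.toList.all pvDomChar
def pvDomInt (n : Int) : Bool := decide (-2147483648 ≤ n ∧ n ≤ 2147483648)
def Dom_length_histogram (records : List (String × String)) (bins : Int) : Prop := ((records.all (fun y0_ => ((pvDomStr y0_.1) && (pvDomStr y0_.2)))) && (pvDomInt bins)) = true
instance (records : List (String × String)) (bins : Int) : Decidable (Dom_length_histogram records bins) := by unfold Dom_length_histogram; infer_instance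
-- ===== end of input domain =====

-- B replaces A's bucket-counting dict plus a sorted() pass over its keys by sort-then-scan:
-- it sorts the lengths once, maps them to a nondecreasing bucket sequence and run-length-encodes
-- that sequence with a two-pointer scan, each maximal run emitting one row; objective: alternative.

-- ===== PORT A =====
def length_histogram (records : List (String × String)) (bins : Int) : List (String × Int) :=
  if records = [] then []
  else
    let lengths : List Int := records.map (fun p => PySem.Str.len p.2)
    let min_l : Int := (PySem.List.min? lengths (fun x => x)).getD 0
    let max_l : Int := (PySem.List.max? lengths (fun x => x)).getD 0
    if min_l = max_l then [(PySem.Int.toStr min_l, (lengths.length : Int))]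
    else
      let bin_size : Int := max 1 (PySem.Int.floordiv (max_l - min_l) bins)
      let hist : PySem.Dict Int Int :=
        lengths.foldl (fun d l => d.modify (PySem.Int.floordiv (l - min_l) bin_size) 0 (· + 1))
          PySem.Dict.empty
      (PySem.List.sorted hist.keys (fun x => x) false).foldl (fun rows b =>
        rows ++ [(PySem.Int.toStr (min_l + b * bin_size) ++ "–" ++
                   PySem.Int.toStr (min_l + b * bin_size + bin_size - 1), hist.getD b 0)]) []

-- ===== PORT B =====
-- the two-pointer run-length scan of B (outer while; the inner 'while buckets[j] == b: j += 1'
-- is the takeWhile/dropWhile split of the remaining list)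
def pvRuns (min_l bin_size : Int) : List Int → List (String × Int)
  | [] => []
  | b :: t =>
      (PySem.Int.toStr (min_l + b * bin_size) ++ "–" ++
         PySem.Int.toStr (min_l + b * bin_size + bin_size - 1),
       (((t.takeWhile (fun x => x == b)).length : Int) + 1)) ::
      pvRuns min_l bin_size (t.dropWhile (fun x => x == b))
termination_by l => l.length
decreasing_by
  simpa [Nat.lt_succ_iff] using (List.dropWhile_sublist (l := t) (p := fun x => x == b)).length_le

def length_histogram_alt (records : List (String × String)) (bins : Int) : List (String × Int) :=
  if records = [] then []
  else
    let lengths : List Int :=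
      PySem.List.sorted (records.map (fun p => PySem.Str.len p.2)) (fun x => x) false
    let min_l : Int := (PySem.List.pyGet? lengths 0).getD 0
    let max_l : Int := (PySem.List.pyGet? lengths (-1)).getD 0
    if min_l = max_l then [(PySem.Int.toStr min_l, (lengths.length : Int))]
    else
      let bin_size : Int := max 1 (PySem.Int.floordiv (max_l - min_l) bins)
      let buckets : List Int := lengths.map (fun l => PySem.Int.floordiv (l - min_l) bin_size)
      pvRuns min_l bin_size buckets

-- ===== PRECONDITION & SPEC =====
-- Pre_ excludes exactly the inputs where A raises ZeroDivisionError: bins = 0 with a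
-- nonempty records list whose sequence lengths are not all equal (B raises there too).
def Pre_length_histogram (records : List (String × String)) (bins : Int) : Prop :=
  bins ≠ 0 ∨ (records.map (fun p => PySem.Str.len p.2)).Pairwise (fun a b => a = b)
instance (records : List (String × String)) (bins : Int) : Decidable (Pre_length_histogram records bins) := by unfold Pre_length_histogram; infer_instance

def pvWitness_length_histogram : (List (String × String)) × Int := ([("a", "xy"), ("b", "xyzzy")], 2)

def Spec_length_histogram (records : List (String × String)) (bins : Int) (out : List (String × Int)) : Prop := out = length_histogram_alt records bins
instance (records : List (String × String)) (bins : Int) (out : List (String × Int)) : Decidable (Spec_length_histogram records bins out) := by unfold Spec_length_histogram; infer_instance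

-- ===== CLAIM (what is proved, stated in full; the proofs are below) =====
def Claim_equal_length_histogram : Prop := ∀ (records : List (String × String)) (bins : Int), Dom_length_histogram records bins → Pre_length_histogram records bins → Spec_length_histogram records bins (length_histogram records bins)

-- ===== LEMMAS AND PROOFS =====

-- the run-length scan of a nondecreasing list equals one row per distinct element, taken in
-- increasing order, with its multiplicity (ys names that enumeration of the distinct elements)
theorem pv_runs_eq_aux (m s : Int) (n : Nat) : ∀ (xs ys : List Int), xs.length ≤ n →
    xs.Pairwise (· ≤ ·) → ys.Nodup → ys.Pairwise (· < ·) → (∀ a, a ∈ ys ↔ a ∈ xs) →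
    pvRuns m s xs = ys.map (fun b =>
      (PySem.Int.toStr (m + b * s) ++ "–" ++ PySem.Int.toStr (m + b * s + s - 1),
       (xs.count b : Int))) := by
  induction n with
  | zero =>
    intro xs ys hlen _ _ _ hmem
    have hxs : xs = [] := List.eq_nil_of_length_eq_zero (Nat.le_zero.mp hlen)
    subst hxs
    have hys : ys = [] := List.eq_nil_iff_forall_not_mem.mpr (fun a ha => by
      simpa using (hmem a).mp ha)
    simp [hys, pvRuns]
  | succ n ih =>
    intro xs ys hlen hxs hnd hlt hmem
    cases xs with
    | nil =>
      have hys : ys = [] := List.eq_nil_iff_forall_not_mem.mpr (fun a ha => by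
        simpa using (hmem a).mp ha)
      simp [hys, pvRuns]
    | cons b t =>
      have hble : ∀ x ∈ t, b ≤ x := (List.pairwise_cons.mp hxs).1
      have htpw : t.Pairwise (· ≤ ·) := (List.pairwise_cons.mp hxs).2
      have htr : t.takeWhile (fun x => x == b) ++ t.dropWhile (fun x => x == b) = t :=
        List.takeWhile_append_dropWhile
      have hrunb : ∀ x ∈ t.takeWhile (fun x => x == b), x = b := fun x hx => by
        simpa using List.mem_takeWhile_imp hx
      have hrestpw : (t.dropWhile (fun x => x == b)).Pairwise (· ≤ ·) :=
        htpw.sublist (List.dropWhile_sublist _)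
      have hbrest : ∀ x ∈ t.dropWhile (fun x => x == b), b < x := by
        cases hrest : t.dropWhile (fun x => x == b) with
        | nil => simp
        | cons r rs =>
          have hrt : r ∈ t := (List.dropWhile_sublist _).mem (hrest ▸ List.mem_cons_self ..)
          have hrne : r ≠ b := by
            have w : List.dropWhile (fun x => x == b) t ≠ [] := by rw [hrest]; simp
            have h1 := List.head_dropWhile_not (fun x => x == b) (l := t) (w := w)
            have hh : (List.dropWhile (fun x => x == b) t).head w = r := by simp [hrest]
            rw [hh] at h1
            simpa using h1
          have hbr : b < r := lt_of_le_of_ne (hble r hrt) (Ne.symm hrne)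
          intro x hx
          rcases List.mem_cons.mp hx with rfl | hx'
          · exact hbr
          · exact lt_of_lt_of_le hbr ((List.pairwise_cons.mp (hrest ▸ hrestpw)).1 x hx')
      have hcountb : (b :: t).count b = (t.takeWhile (fun x => x == b)).length + 1 := by
        have h1 : (t.takeWhile (fun x => x == b)).count b
            = (t.takeWhile (fun x => x == b)).length :=
          List.count_eq_length.mpr (fun x hx => (hrunb x hx).symm ▸ rfl)
        have h2 : (t.dropWhile (fun x => x == b)).count b = 0 :=
          List.count_eq_zero.mpr (fun hb => lt_irrefl b (hbrest b hb))
        have hct : t.count b = (t.takeWhile (fun x => x == b)).length := by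
          conv_lhs => rw [← htr]
          rw [List.count_append, h1, h2]
          omega
        rw [List.count_cons_self, hct]
      
      have hbys : b ∈ ys := (hmem b).mpr (List.mem_cons_self ..)
      cases ys with
      | nil => simp at hbys
      | cons y ys' =>
        have hyb : y = b := by
          rcases List.mem_cons.mp hbys with h | h
          · exact h.symm
          · have h1 : y < b := (List.pairwise_cons.mp hlt).1 b h
            have h2 : y ∈ (b :: t) := (hmem y).mp (List.mem_cons_self ..)
            rcases List.mem_cons.mp h2 with rfl | hyt
            · rfl
            · exact absurd (hble y hyt) (not_le.mpr h1)
        subst hyb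
        have hynotin : y ∉ ys' := (List.nodup_cons.mp hnd).1
        have hylt : ∀ a ∈ ys', y < a := (List.pairwise_cons.mp hlt).1
        have hmem' : ∀ a, a ∈ ys' ↔ a ∈ t.dropWhile (fun x => x == y) := by
          intro a
          constructor
          · intro ha
            have hya : y < a := hylt a ha
            have : a ∈ y :: t := (hmem a).mp (List.mem_cons_of_mem _ ha)
            rcases List.mem_cons.mp this with rfl | hat
            · exact absurd hya (lt_irrefl _)
            · rw [← htr] at hat
              rcases List.mem_append.mp hat with h | h
              · exact absurd (hrunb a h) (ne_of_gt hya)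
              · exact h
          · intro ha
            have hat : a ∈ t := by rw [← htr]; exact List.mem_append_right _ ha
            have : a ∈ y :: ys' := (hmem a).mpr (List.mem_cons_of_mem _ hat)
            rcases List.mem_cons.mp this with rfl | h
            · exact absurd (hbrest a ha) (lt_irrefl _)
            · exact h
        have hcount' : ∀ a ∈ ys', (y :: t).count a = (t.dropWhile (fun x => x == y)).count a := by
          intro a ha
          have hya : y < a := hylt a ha
          have hruncount : (t.takeWhile (fun x => x == y)).count a = 0 :=
            List.count_eq_zero.mpr (fun hb => by have := hrunb a hb; omega)
          rw [List.count_cons_of_ne (Ne.symm (ne_of_gt hya))]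
          conv_lhs => rw [← htr]
          rw [List.count_append, hruncount]
          omega
        have hrestlen : (t.dropWhile (fun x => x == y)).length ≤ n := by
          have h1 := (List.dropWhile_sublist (l := t) (p := fun x => x == y)).length_le
          simp only [List.length_cons] at hlen
          omega
        rw [pvRuns, ih (t.dropWhile (fun x => x == y)) ys' hrestlen hrestpw
          (List.nodup_cons.mp hnd).2 (List.pairwise_cons.mp hlt).2 hmem', List.map_cons]
        congr 1
        · congr 1
          rw [hcountb]
          push_cast
          ring
        · apply List.map_congr_left
          intro a ha
          rw [hcount' a ha]

theorem pv_runs_eq (m s : Int) (xs ys : List Int)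
    (hxs : xs.Pairwise (· ≤ ·)) (hnd : ys.Nodup) (hlt : ys.Pairwise (· < ·))
    (hmem : ∀ a, a ∈ ys ↔ a ∈ xs) :
    pvRuns m s xs = ys.map (fun b =>
      (PySem.Int.toStr (m + b * s) ++ "–" ++ PySem.Int.toStr (m + b * s + s - 1),
       (xs.count b : Int))) :=
  pv_runs_eq_aux m s xs.length xs ys (le_refl _) hxs hnd hlt hmem

-- ===== VERDICT (by name: the statement is the Claim_ definition above) =====
theorem length_histogram_spec : Claim_equal_length_histogram := by
  intro records bins _dom _hpre
  unfold Spec_length_histogram length_histogram length_histogram_alt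
  by_cases hnil : records = []
  · simp [hnil]
  simp only [if_neg hnil]
  set L : List Int := records.map (fun p => PySem.Str.len p.2) with hL
  have hLne : L ≠ [] := by simpa [hL] using hnil
  set S : List Int := PySem.List.sorted L (fun x => x) false with hS
  have hSne : S ≠ [] := by rw [hS, Ne, PySem.List.sorted_eq_nil_iff]; exact hLne
  have hSperm : S.Perm L := PySem.List.sorted_perm ..
  obtain ⟨m, hm⟩ : ∃ m, PySem.List.min? L (fun x => x) = some m := by
    cases h : PySem.List.min? L (fun x => x) with
    | none => exact absurd ((PySem.List.min?_eq_none_iff L _).mp h) hLne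
    | some m => exact ⟨m, rfl⟩
  obtain ⟨M, hM⟩ : ∃ M, PySem.List.max? L (fun x => x) = some M := by
    cases h : PySem.List.max? L (fun x => x) with
    | none => exact absurd ((PySem.List.max?_eq_none_iff L _).mp h) hLne
    | some M => exact ⟨M, rfl⟩
  have hmin : ∀ l ∈ L, m ≤ l := PySem.List.min?_isMin hm
  have hmax : ∀ l ∈ L, l ≤ M := PySem.List.max?_isMax hM
  obtain ⟨h0, tS, hcons⟩ : ∃ h0 tS, S = h0 :: tS := by
    cases hs : S with
    | nil => exact absurd hs hSne
    | cons a b => exact ⟨a, b, rfl⟩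
  have hSpos : 0 < S.length := by rw [hcons]; simp
  have hget0 : PySem.List.pyGet? S 0 = some h0 := by
    rw [hcons]; simp [PySem.List.pyGet?, PySem.List.pyIdx?]
  have hgetlast : PySem.List.pyGet? S (-1) = some (S[S.length - 1]'(by omega)) := by
    simp only [PySem.List.pyGet?, PySem.List.pyIdx?]
    have h1 : ¬ (0:Int) ≤ -1 := by omega
    have h2 : -(S.length : Int) ≤ -1 := by omega
    simp [h2, List.getElem?_eq_getElem (by omega : S.length - 1 < S.length)]
  have hhead_eq : h0 = m := by
    refine le_antisymm ?_ (hmin h0 (hSperm.mem_iff.mp (hcons ▸ List.mem_cons_self ..)))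
    exact PySem.List.key_head_sorted_le L (fun x => x) (hS ▸ hcons) m (PySem.List.min?_mem hm)
  have hlast_eq : S[S.length - 1]'(by omega) = M := by
    refine le_antisymm (hmax _ (hSperm.mem_iff.mp (List.getElem_mem _))) ?_
    have hMS : M ∈ S := hSperm.mem_iff.mpr (PySem.List.max?_mem hM)
    obtain ⟨p, hp, hpe⟩ := List.mem_iff_getElem.mp hMS
    rw [← hpe]
    have := PySem.List.key_sorted_getElem_mono L (fun x => x)
      (p := p) (q := S.length - 1) (by omega) (by rw [← hS]; omega)
    simpa [← hS] using this
  rw [hm, hM, hget0, hgetlast]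
  simp only [Option.getD_some, hhead_eq, hlast_eq]
  by_cases heq : m = M
  · simp [heq]
    rw [hS, PySem.List.length_sorted]
  simp only [if_neg heq]
  set bs : Int := max 1 (PySem.Int.floordiv (M - m) bins) with hbs
  have hbspos : (0:Int) < bs := lt_of_lt_of_le one_pos (le_max_left ..)
  set K : List Int := L.map (fun l => PySem.Int.floordiv (l - m) bs) with hK
  set K' : List Int := S.map (fun l => PySem.Int.floordiv (l - m) bs) with hK'
  have hK'perm : K'.Perm K := hSperm.map _
  -- ===== A side: fold over the sorted counter keys is a map with counts =====
  have hhist : L.foldl (fun d l => PySem.Dict.modify d (PySem.Int.floordiv (l - m) bs) 0 (· + 1))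
      PySem.Dict.empty = PySem.Dict.counter K := by
    simp [PySem.Dict.counter_eq_foldl, hK, List.foldl_map]
  rw [hhist, PySem.Dict.keys_counter, PySem.List.foldl_append_singleton_eq_map, List.nil_append]
  -- ===== B side: the run-length scan of the sorted bucket sequence =====
  have hK'pw : K'.Pairwise (· ≤ ·) := by
    refine List.Pairwise.map _ (fun a b hab => ?_) (PySem.List.sorted_pairwise L (fun x => x))
    rw [PySem.Int.floordiv_eq_ediv_of_pos hbspos, PySem.Int.floordiv_eq_ediv_of_pos hbspos]
    exact Int.ediv_le_ediv hbspos (by omega)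
  have hys_nd : (PySem.List.sorted (PySem.Set.ofList K) (fun x => x) false).Nodup :=
    (PySem.List.sorted_perm ..).nodup_iff.mpr (PySem.Set.nodup_ofList K)
  have hys_lt : (PySem.List.sorted (PySem.Set.ofList K) (fun x => x) false).Pairwise (· < ·) :=
    PySem.List.sorted_ofList_pairwise_lt K
  have hys_mem : ∀ a, a ∈ PySem.List.sorted (PySem.Set.ofList K) (fun x => x) false ↔ a ∈ K' := by
    intro a
    rw [PySem.List.mem_sorted, PySem.Set.mem_ofList, hK'perm.mem_iff]
  rw [pv_runs_eq m bs K' _ hK'pw hys_nd hys_lt hys_mem]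
  apply List.map_congr_left
  intro b _
  rw [PySem.Dict.getD_counter, hK'perm.count_eq]
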